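-- pv_equiv track=rewrite | github.com/pypi-data/pypi-mirror-284 | packages/dbt-bytehouse/dbt_bytehouse-1.7.3-py3-none-any.whl/dbt/adapters/bytehouse/nativeclient.py | modify_rename_table_syntax
-- ===== SOURCE A (Python) =====
-- def modify_rename_table_syntax(sql):
--     tokens = sql.split(" ")
--     modify_sql = ""
--     st = False
--     for token in tokens:
--         if token == "rename":
--             st = True
--         if st:
--             modify_sql += token
--             modify_sql += " "
--     return modify_sql
-- ===== SOURCE B (Python) =====
-- def modify_rename_table_syntax(sql):
--     tokens = sql.split(" ")
--     if "rename" not in tokens: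
--         return ""
--     i = tokens.index("rename")
--     return " ".join(tokens[i:]) + " "
-- ===== Notes on version B (the rewrite author's own statement) =====
-- stated objective: simpler
-- what changed: Replaces the flag-driven accumulation loop (a boolean 'st' latched inside the scan, appending token+space per iteration) with a locate-then-slice decomposition: find the first 'rename' token with list.index, slice from it and ' '.join the tail plus a trailing space.
import Mathlib
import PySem

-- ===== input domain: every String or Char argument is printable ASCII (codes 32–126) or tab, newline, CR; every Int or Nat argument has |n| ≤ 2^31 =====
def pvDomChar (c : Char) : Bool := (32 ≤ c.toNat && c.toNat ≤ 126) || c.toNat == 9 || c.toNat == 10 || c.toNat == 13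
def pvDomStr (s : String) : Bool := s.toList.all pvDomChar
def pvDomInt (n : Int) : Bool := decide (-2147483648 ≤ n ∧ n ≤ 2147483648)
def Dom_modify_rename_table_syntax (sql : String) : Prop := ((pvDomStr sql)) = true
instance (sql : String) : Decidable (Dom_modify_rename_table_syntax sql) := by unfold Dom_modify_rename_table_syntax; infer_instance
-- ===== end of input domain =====

-- B replaces A's flag-latched accumulation scan by locate-then-slice: find the first
-- "rename" token, slice from it and join with spaces (plus the trailing space); simpler decomposition.


-- ===== PORT A =====
-- tokens = sql.split(" "); flag 'st' latched at the first "rename" token; while st, append token + " ".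
def pvAStep (acc : List Char × Bool) (token : List Char) : List Char × Bool :=
  let st := if token = "rename".toList then true else acc.2
  if st then (acc.1 ++ token ++ [' '], st) else (acc.1, st)

def modify_rename_table_syntax (sql : String) : String :=
  String.ofList (((PySem.Chars.splitOn sql.toList " ".toList).foldl pvAStep ([], false)).1)

-- ===== PORT B =====
-- if "rename" not in tokens: return ""; i = tokens.index("rename"); return " ".join(tokens[i:]) + " "
def modify_rename_table_syntax_alt (sql : String) : String :=
  match PySem.List.index? (PySem.Chars.splitOn sql.toList " ".toList) "rename".toList with
  | none => ""
  | some i =>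
    String.ofList (PySem.Chars.join [' '] ((PySem.Chars.splitOn sql.toList " ".toList).drop i) ++ [' '])

-- ===== PRECONDITION & SPEC =====
def Spec_modify_rename_table_syntax (sql : String) (out : String) : Prop := out = modify_rename_table_syntax_alt sql
instance (sql : String) (out : String) : Decidable (Spec_modify_rename_table_syntax sql out) := by unfold Spec_modify_rename_table_syntax; infer_instance

-- ===== CLAIM (what is proved, stated in full; the proofs are below) =====
def Claim_equal_modify_rename_table_syntax : Prop := ∀ (sql : String), Dom_modify_rename_table_syntax sql → Spec_modify_rename_table_syntax sql (modify_rename_table_syntax sql)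

-- ===== LEMMAS AND PROOFS =====

-- once st is true it stays true and every remaining token is appended with a space
theorem pvA_foldl_true (ts : List (List Char)) (acc : List Char) :
    ts.foldl pvAStep (acc, true) = (acc ++ ts.flatMap (fun t => t ++ [' ']), true) := by
  induction ts generalizing acc with
  | nil => simp
  | cons t ts ih =>
    simp [pvAStep, ih, List.append_assoc]

-- " ".join(l) + " " equals flatMap (· ++ " ") on a nonempty l
theorem pvJoin_flatMap (l : List (List Char)) (h : l ≠ []) :
    PySem.Chars.join [' '] l ++ [' '] = l.flatMap (fun t => t ++ [' ']) := by
  induction l with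
  | nil => simp at h
  | cons t ts ih =>
    cases ts with
    | nil => simp [PySem.Chars.join_singleton]
    | cons u us =>
      rw [PySem.Chars.join_cons_cons, List.flatMap_cons, ← ih (by simp)]
      simp [List.append_assoc]

theorem pvA_foldl_eq (ts : List (List Char)) :
    (ts.foldl pvAStep ([], false)).1 =
      match PySem.List.index? ts "rename".toList with
      | none => []
      | some i => PySem.Chars.join [' '] (ts.drop i) ++ [' '] := by
  induction ts with
  | nil => simp [PySem.List.index?]
  | cons t ts ih =>
    by_cases h : t = "rename".toList
    · subst h
      rw [PySem.List.index?_cons_self]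
      have hstep : pvAStep ([], false) "rename".toList = ("rename".toList ++ [' '], true) := by
        simp [pvAStep]
      rw [List.foldl_cons, hstep, pvA_foldl_true]
      show "rename".toList ++ [' '] ++ List.flatMap (fun t => t ++ [' ']) ts =
        PySem.Chars.join [' '] (List.drop 0 ("rename".toList :: ts)) ++ [' ']
      rw [List.drop_zero, pvJoin_flatMap _ (by simp), List.flatMap_cons]
    · rw [PySem.List.index?_cons_of_ne _ h]
      have hstep : pvAStep ([], false) t = ([], false) := by
        simp [pvAStep, show t ≠ ['r', 'e', 'n', 'a', 'm', 'e'] from by simpa using h]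
      rw [List.foldl_cons, hstep, ih]
      cases PySem.List.index? ts "rename".toList <;> simp

-- ===== VERDICT (by name: the statement is the Claim_ definition above) =====
theorem modify_rename_table_syntax_spec : Claim_equal_modify_rename_table_syntax := by
  intro sql _
  unfold Spec_modify_rename_table_syntax modify_rename_table_syntax modify_rename_table_syntax_alt
  rw [pvA_foldl_eq]
  cases PySem.List.index? (PySem.Chars.splitOn sql.toList " ".toList) "rename".toList <;> rfl
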